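-- pv_equiv track=rewrite | github.com/foobuzz/todo | source/todo/rainbow.py | xterm_palette_to_rgb
-- ===== SOURCE A (Python) =====
-- BASIC_RGB = [
-- 	(0, 0, 0),
-- 	(205, 0, 0),
-- 	(0, 205, 0),
-- 	(205, 205, 0),
-- 	(0, 0, 238),
-- 	(205, 0, 205),
-- 	(0, 205, 205),
-- 	(229, 229, 229)
-- ]
--
-- XTERM_JUMPS = [95, 40, 40, 40, 40]
--
-- XTERM_COEFF = [36, 6, 1]
--
-- XTERM_GRAY_LEVELS_OFFSET = 232
--
-- XTERM_COLORS_OFFSET = 16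
--
-- def xterm_palette_to_rgb(color):
-- 	color = int(color)
-- 	# Basic colors
-- 	if color <= 7:
-- 		return BASIC_RGB[color]
-- 	if 8 <= color <= 15:
-- 		return tuple(255 if c > 0 else 0 for c in BASIC_RGB[color - 8])
-- 	# Gray levels
-- 	if XTERM_GRAY_LEVELS_OFFSET <= color <= 255:
-- 		return (8 + 10*(color - XTERM_GRAY_LEVELS_OFFSET),) * 3
-- 	# Other colors
-- 	value = color - XTERM_COLORS_OFFSET
-- 	mod = value
-- 	rgb = []
-- 	for c in XTERM_COEFF:
-- 		val, mod = divmod(mod, c)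
-- 		rgb.append(sum(XTERM_JUMPS[:val]))
-- 	return tuple(rgb)
-- ===== SOURCE B (Python) =====
-- BASIC_RGB = [
-- 	(0, 0, 0),
-- 	(205, 0, 0),
-- 	(0, 205, 0),
-- 	(205, 205, 0),
-- 	(0, 0, 238),
-- 	(205, 0, 205),
-- 	(0, 205, 205),
-- 	(229, 229, 229)
-- ]
--
-- XTERM_GRAY_LEVELS_OFFSET = 232
--
-- XTERM_COLORS_OFFSET = 16
--
--
-- def _cube_level(x):
-- 	# closed form of the cumulative xterm cube jumps: 0, 95, 135, 175, 215, 255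
-- 	return 0 if x == 0 else 55 + 40 * x
--
--
-- def xterm_palette_to_rgb(color):
-- 	color = int(color)
-- 	# Basic colors
-- 	if color <= 7:
-- 		return BASIC_RGB[color]
-- 	if 8 <= color <= 15:
-- 		return tuple(255 if c > 0 else 0 for c in BASIC_RGB[color - 8])
-- 	# Gray levels
-- 	if XTERM_GRAY_LEVELS_OFFSET <= color <= 255:
-- 		return (8 + 10*(color - XTERM_GRAY_LEVELS_OFFSET),) * 3
-- 	# Color cube: digits of value in base 6, each mapped by the closed form
-- 	value = color - XTERM_COLORS_OFFSET
-- 	return (_cube_level(value // 36),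
-- 		_cube_level(value // 6 % 6),
-- 		_cube_level(value % 6))
-- ===== Notes on version B (the rewrite author's own statement) =====
-- stated objective: simpler
-- what changed: B replaces A's divmod loop over XTERM_COEFF with prefix-sum slice lookups over XTERM_JUMPS by direct base-six digit extraction, each digit mapped through a closed affine form of the cumulative jumps.
-- outside the precondition, e.g. on xterm_palette_to_rgb(256): A returns (255, 215, 0), B returns (295, 215, 0); on xterm_palette_to_rgb(300): A returns (255, 255, 135), B returns (335, 255, 135); on xterm_palette_to_rgb(-9): A raises IndexError, B raises IndexError
import Mathlib
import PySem

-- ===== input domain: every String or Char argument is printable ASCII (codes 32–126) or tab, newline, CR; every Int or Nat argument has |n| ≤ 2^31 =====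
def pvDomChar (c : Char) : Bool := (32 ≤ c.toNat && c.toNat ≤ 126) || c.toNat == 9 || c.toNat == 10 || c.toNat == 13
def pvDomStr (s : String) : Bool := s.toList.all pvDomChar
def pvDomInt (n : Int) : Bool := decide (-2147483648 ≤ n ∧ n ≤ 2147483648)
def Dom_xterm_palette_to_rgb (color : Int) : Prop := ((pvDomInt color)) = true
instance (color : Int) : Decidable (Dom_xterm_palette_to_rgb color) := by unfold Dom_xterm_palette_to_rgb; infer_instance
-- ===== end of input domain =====

-- ===== PORT A =====
-- B keeps the three range-dispatch branches and computes the colour-cube channel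
-- levels by direct digit arithmetic and a closed form instead of A's divmod loop
-- with prefix-sum slices; simpler, same cost.
def pvBasicRGB : List (Int × Int × Int) :=
  [(0, 0, 0), (205, 0, 0), (0, 205, 0), (205, 205, 0),
   (0, 0, 238), (205, 0, 205), (0, 205, 205), (229, 229, 229)]

def pvXtermJumps : List Int := [95, 40, 40, 40, 40]

def pvXtermCoeff : List Int := [36, 6, 1]

def xterm_palette_to_rgb (color : Int) : Int × Int × Int :=
  if color ≤ 7 then
    (PySem.List.pyGet? pvBasicRGB color).getD (0, 0, 0)
  else if 8 ≤ color ∧ color ≤ 15 then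
    let c := (PySem.List.pyGet? pvBasicRGB (color - 8)).getD (0, 0, 0)
    (if c.1 > 0 then 255 else 0, if c.2.1 > 0 then 255 else 0, if c.2.2 > 0 then 255 else 0)
  else if 232 ≤ color ∧ color ≤ 255 then
    let g := 8 + 10 * (color - 232)
    (g, g, g)
  else
    let value := color - 16
    let st := pvXtermCoeff.foldl
      (fun (st : Int × List Int) (c : Int) =>
        let val := PySem.Int.floordiv st.1 c
        let mod := PySem.Int.mod st.1 c
        (mod, st.2 ++ [(PySem.List.slice pvXtermJumps none (some val)).sum]))
      (value, [])
    match st.2 with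
    | [r, g, b] => (r, g, b)
    | _ => (0, 0, 0)

-- ===== PORT B =====
-- closed form of the cumulative xterm cube jumps: 0, 95, 135, 175, 215, 255
def pvCubeLevel (x : Int) : Int := if x = 0 then 0 else 55 + 40 * x

def xterm_palette_to_rgb_alt (color : Int) : Int × Int × Int :=
  if color ≤ 7 then
    (PySem.List.pyGet? pvBasicRGB color).getD (0, 0, 0)
  else if 8 ≤ color ∧ color ≤ 15 then
    let c := (PySem.List.pyGet? pvBasicRGB (color - 8)).getD (0, 0, 0)
    (if c.1 > 0 then 255 else 0, if c.2.1 > 0 then 255 else 0, if c.2.2 > 0 then 255 else 0)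
  else if 232 ≤ color ∧ color ≤ 255 then
    let g := 8 + 10 * (color - 232)
    (g, g, g)
  else
    let value := color - 16
    (pvCubeLevel (PySem.Int.floordiv value 36),
     pvCubeLevel (PySem.Int.mod (PySem.Int.floordiv value 6) 6),
     pvCubeLevel (PySem.Int.mod value 6))

-- ===== PRECONDITION & SPEC =====
-- Pre_ excludes indices below the basic-color table's reach, where A raises IndexError,
-- and indices past the end of the xterm palette, a corner outside the function's
-- purpose where no value is specified: A and B extrapolate the cube differently
-- there and either value is as defensible as the other.
def Pre_xterm_palette_to_rgb (color : Int) : Prop := -8 ≤ color ∧ color ≤ 255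
instance (color : Int) : Decidable (Pre_xterm_palette_to_rgb color) := by unfold Pre_xterm_palette_to_rgb; infer_instance

def pvWitness_xterm_palette_to_rgb : Int := 100

def Spec_xterm_palette_to_rgb (color : Int) (out : Int × Int × Int) : Prop := out = xterm_palette_to_rgb_alt color
instance (color : Int) (out : Int × Int × Int) : Decidable (Spec_xterm_palette_to_rgb color out) := by unfold Spec_xterm_palette_to_rgb; infer_instance

-- ===== CLAIM (what is proved, stated in full; the proofs are below) =====
def Claim_equal_xterm_palette_to_rgb : Prop := ∀ (color : Int), Dom_xterm_palette_to_rgb color → Pre_xterm_palette_to_rgb color → Spec_xterm_palette_to_rgb color (xterm_palette_to_rgb color)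

-- ===== LEMMAS AND PROOFS =====

-- both ports agree on every palette index, checked value by value
set_option maxRecDepth 4000 in
theorem pv_agree_all : ∀ n : Fin 264,
    xterm_palette_to_rgb ((n : Int) - 8) = xterm_palette_to_rgb_alt ((n : Int) - 8) := by
  decide

-- ===== VERDICT (by name: the statement is the Claim_ definition above) =====
theorem xterm_palette_to_rgb_spec : Claim_equal_xterm_palette_to_rgb := by
  intro color _ hpre
  obtain ⟨h1, h2⟩ := hpre
  unfold Spec_xterm_palette_to_rgb
  have hn : (color + 8).toNat < 264 := by omega
  have hc : color = ((⟨(color + 8).toNat, hn⟩ : Fin 264) : Int) - 8 := by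
    push_cast
    omega
  rw [hc]
  exact pv_agree_all _
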